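-- pv_equiv track=rewrite | github.com/Ace1928/eidosian_forge | archive_forge/code/func__map_to_contiguous.py | _map_to_contiguous
-- ===== SOURCE A (Python) =====
-- import itertools
--
-- def _map_to_contiguous(ids_iterable):
--     uniq_ids = {}
--     n = 0
--     for id_ in itertools.chain.from_iterable(ids_iterable):
--         if id_ not in uniq_ids:
--             uniq_ids[id_] = n
--             n += 1
--     return uniq_ids
-- ===== SOURCE B (Python) =====
-- import itertools
--
-- def _map_to_contiguous(ids_iterable):
--     # Stage 1: record the flat position of each id's FIRST occurrence.
--     first_pos = {}
--     for pos, id_ in enumerate(itertools.chain.from_iterable(ids_iterable)):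
--         first_pos.setdefault(id_, pos)
--     # Stage 2: rank ids by their first-occurrence position; ranks are contiguous.
--     return {id_: rank for rank, id_ in enumerate(sorted(first_pos, key=first_pos.get))}
-- ===== Notes on version B (the rewrite author's own statement) =====
-- stated objective: alternative
-- what changed: Replaces A's single-pass membership-test-plus-counter loop by a two-stage algorithm: record each id's first flat position with setdefault, then rank ids by sorting on that position and enumerating the sorted order.
import Mathlib
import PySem

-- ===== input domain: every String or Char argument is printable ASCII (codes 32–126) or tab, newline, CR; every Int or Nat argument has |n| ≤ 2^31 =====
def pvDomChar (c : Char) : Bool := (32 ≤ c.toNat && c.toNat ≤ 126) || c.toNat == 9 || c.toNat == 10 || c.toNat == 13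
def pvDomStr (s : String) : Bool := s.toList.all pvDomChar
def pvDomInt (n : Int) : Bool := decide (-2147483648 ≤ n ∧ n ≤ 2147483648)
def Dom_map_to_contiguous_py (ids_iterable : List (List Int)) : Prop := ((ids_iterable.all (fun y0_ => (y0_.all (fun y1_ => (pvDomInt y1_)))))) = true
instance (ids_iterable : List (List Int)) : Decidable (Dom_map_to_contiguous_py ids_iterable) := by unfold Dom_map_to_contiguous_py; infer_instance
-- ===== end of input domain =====

-- B records each id's first flat position, then sorts ids by that position and enumerates ranks,
-- instead of A's single-pass membership-test-plus-counter loop (same return value, different algorithm).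


-- ===== PORT A =====
-- A: single pass over the flattened ids, assigning the next counter value to each unseen id.
def map_to_contiguous_py (ids_iterable : List (List Int)) : List (Int × Int) :=
  let st := ids_iterable.flatten.foldl
    (fun (st : PySem.Dict Int Int × Int) id_ =>
      if st.1.contains id_ then st else (st.1.insert id_ st.2, st.2 + 1))
    (PySem.Dict.empty, 0)
  st.1.items

-- ===== PORT B =====
-- B: first_pos[id] = flat position of id's first occurrence (setdefault keeps the first);
--    then rank ids by sorting the keys on that position (key=first_pos.get; every key is
--    present, so .get is its stored value, ported as getD with an unused default) and
--    build the result dict by inserting (id, rank) along the enumeration.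
def map_to_contiguous_py_alt (ids_iterable : List (List Int)) : List (Int × Int) :=
  let fp := (PySem.List.enumerate ids_iterable.flatten).foldl
    (fun (d : PySem.Dict Int Int) p => d.setdefault p.2 p.1) PySem.Dict.empty
  let ordered := PySem.List.sorted fp.keys (fun k => fp.getD k 0) false
  ((PySem.List.enumerate ordered).foldl
    (fun (d : PySem.Dict Int Int) p => d.insert p.2 p.1) PySem.Dict.empty).items

-- ===== PRECONDITION & SPEC =====
def Spec_map_to_contiguous_py (ids_iterable : List (List Int)) (out : List (Int × Int)) : Prop := out = map_to_contiguous_py_alt ids_iterable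
instance (ids_iterable : List (List Int)) (out : List (Int × Int)) : Decidable (Spec_map_to_contiguous_py ids_iterable out) := by unfold Spec_map_to_contiguous_py; infer_instance

-- ===== CLAIM (what is proved, stated in full; the proofs are below) =====
def Claim_equal_map_to_contiguous_py : Prop := ∀ (ids_iterable : List (List Int)), Dom_map_to_contiguous_py ids_iterable → Spec_map_to_contiguous_py ids_iterable (map_to_contiguous_py ids_iterable)

-- ===== LEMMAS AND PROOFS =====

-- the dictionary mapping the i-th element of acc to i; the canonical state of both loops
def pvD (acc : List Int) : PySem.Dict Int Int :=
  PySem.Dict.mk ((PySem.List.enumerate acc).map (fun p => (p.2, p.1)))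

lemma pvD_keys (acc : List Int) : (pvD acc).keys = acc := by
  simp only [pvD, PySem.Dict.keys, List.map_map]
  exact PySem.List.map_snd_enumerate acc 0

lemma pvD_contains (acc : List Int) (x : Int) :
    (pvD acc).contains x = acc.contains x := by
  rw [PySem.Dict.contains_eq_decide_mem_keys, pvD_keys]
  simp

lemma pvD_snoc (acc : List Int) (x : Int) (h : acc.contains x = false) :
    (pvD acc).insert x (acc.length : Int) = pvD (acc ++ [x]) := by
  apply PySem.Dict.ext
  rw [PySem.Dict.items_insert_of_not_contains _ _ (by rw [pvD_contains]; exact h)]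
  simp [pvD, PySem.List.enumerate_append, PySem.List.enumerate]

-- A's loop invariant: the state is always (pvD of the seen-so-far uniques, their count)
lemma a_loop_invariant (xs acc : List Int) :
    xs.foldl (fun (st : PySem.Dict Int Int × Int) id_ =>
        if st.1.contains id_ then st else (st.1.insert id_ st.2, st.2 + 1))
      (pvD acc, (acc.length : Int))
    = (pvD (PySem.Set.update acc xs), ((PySem.Set.update acc xs).length : Int)) := by
  induction xs generalizing acc with
  | nil => simp [PySem.Set.update]
  | cons x xs ih =>
    simp only [List.foldl_cons, pvD_contains]
    by_cases hx : acc.contains x = true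
    · rw [if_pos hx, ih]
      have hx' : x ∈ acc := by simpa using hx
      simp [PySem.Set.update, PySem.Set.add, hx']
    · rw [if_neg hx]
      have hx' : x ∉ acc := by simpa using hx
      rw [show ((pvD acc).insert x (acc.length : Int), (acc.length : Int) + 1)
            = (pvD (acc ++ [x]), ((acc ++ [x]).length : Int)) by
        rw [pvD_snoc acc x (by simpa using hx)]; simp]
      rw [ih]
      simp [PySem.Set.update, PySem.Set.add, hx']

-- B's first loop invariant: keys grow like PySem.Set.update, stay Nodup, values stay
-- below the running position, and the items stay strictly increasing in the value.
lemma fp_loop_invariant (xs : List Int) (s : Int) (d : PySem.Dict Int Int)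
    (hnd : d.keys.Nodup) (hlt : ∀ v ∈ d.values, v < s)
    (hpw : d.items.Pairwise (fun p q => p.2 < q.2)) :
    let d' := (PySem.List.enumerate xs s).foldl
      (fun (d : PySem.Dict Int Int) p => d.setdefault p.2 p.1) d
    d'.keys = PySem.Set.update d.keys xs ∧ d'.keys.Nodup ∧
      (∀ v ∈ d'.values, v < s + xs.length) ∧ d'.items.Pairwise (fun p q => p.2 < q.2) := by
  induction xs generalizing s d with
  | nil => simpa [PySem.List.enumerate, PySem.Set.update] using ⟨hnd, hlt, hpw⟩
  | cons x xs ih =>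
    rw [PySem.List.enumerate_cons]
    simp only [List.foldl_cons]
    by_cases hc : d.contains x = true
    · rw [PySem.Dict.setdefault_of_contains d _ hc]
      have hx : x ∈ d.keys := (PySem.Dict.contains_iff_mem_keys d x).mp hc
      have := ih (s + 1) d hnd (fun v hv => by have := hlt v hv; omega) hpw
      simp only [PySem.Set.update, List.foldl_cons] at this ⊢
      have hadd : PySem.Set.add d.keys x = d.keys := by simp [PySem.Set.add, hx]
      rw [hadd]
      refine ⟨this.1, this.2.1, fun v hv => ?_, this.2.2.2⟩
      have := this.2.2.1 v hv; simp only [List.length_cons] at *; push_cast at *; omega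
    · have hc' : d.contains x = false := by simpa using hc
      rw [PySem.Dict.setdefault_of_not_contains d _ hc']
      have hx : x ∉ d.keys := fun hm => by
        rw [(PySem.Dict.contains_iff_mem_keys d x).mpr hm] at hc'; cases hc'
      have hitems : (d.insert x s).items = d.items ++ [(x, s)] :=
        PySem.Dict.items_insert_of_not_contains d s hc'
      have hkeys : (d.insert x s).keys = d.keys ++ [x] :=
        PySem.Dict.keys_insert_of_not_contains d s hc'
      have hnd' : (d.insert x s).keys.Nodup := by
        rw [hkeys]; simpa [List.nodup_append] using ⟨hnd, fun a ha h => hx (h ▸ ha)⟩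
      have hlt' : ∀ v ∈ (d.insert x s).values, v < s + 1 := by
        intro v hv
        simp only [PySem.Dict.values, hitems, List.map_append, List.mem_append] at hv
        rcases hv with hv | hv
        · have := hlt v hv; omega
        · simp at hv; omega
      have hpw' : (d.insert x s).items.Pairwise (fun p q => p.2 < q.2) := by
        rw [hitems, List.pairwise_append]
        refine ⟨hpw, by simp, fun p hp q hq => ?_⟩
        simp at hq; rw [hq]
        refine hlt p.2 ?_
        simp only [PySem.Dict.values, List.mem_map]
        exact ⟨p, hp, rfl⟩
      have := ih (s + 1) (d.insert x s) hnd' hlt' hpw'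
      simp only [PySem.Set.update, List.foldl_cons] at this ⊢
      have hadd : PySem.Set.add d.keys x = d.keys ++ [x] := by simp [PySem.Set.add, hx]
      rw [hadd, ← hkeys]
      refine ⟨this.1, this.2.1, fun v hv => ?_, this.2.2.2⟩
      have := this.2.2.1 v hv; simp only [List.length_cons] at *; push_cast at *; omega

-- the result-building loop over enumerate(ordered) yields exactly pvD ordered
lemma build_loop_eq_pvD (ordered : List Int) (hnd : ordered.Nodup) :
    (PySem.List.enumerate ordered).foldl
      (fun (d : PySem.Dict Int Int) p => d.insert p.2 p.1) PySem.Dict.empty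
    = pvD ordered := by
  apply PySem.Dict.ext
  have h := PySem.Dict.items_foldl_insert_fresh (d := (PySem.Dict.empty : PySem.Dict Int Int))
      (l := PySem.List.enumerate ordered) (k := fun p => p.2) (v := fun p => p.1)
      (fun a _ => by simp [PySem.Dict.contains_empty])
      (by rw [PySem.List.map_snd_enumerate]; exact hnd)
  simpa [pvD] using h

theorem map_to_contiguous_py_spec : Claim_equal_map_to_contiguous_py := by
  intro ids _
  unfold Spec_map_to_contiguous_py map_to_contiguous_py map_to_contiguous_py_alt
  dsimp only
  -- A's side: items of pvD (dedup of the flattened list)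
  have hA := a_loop_invariant ids.flatten []
  simp only [show pvD [] = PySem.Dict.empty from rfl, List.length_nil,
    Int.natCast_zero] at hA
  rw [hA]
  -- B's side
  have hfp := fp_loop_invariant ids.flatten 0 PySem.Dict.empty
      (by simp [PySem.Dict.keys_empty]) (by simp [PySem.Dict.values, PySem.Dict.empty])
      (by simp [PySem.Dict.empty])
  simp only at hfp
  obtain ⟨hkeys, hnd, _, hpw⟩ := hfp
  set fp := (PySem.List.enumerate ids.flatten).foldl
      (fun (d : PySem.Dict Int Int) p => d.setdefault p.2 p.1) PySem.Dict.empty with hfpdef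
  have hkeys' : fp.keys = PySem.Set.update [] ids.flatten := by
    simpa [PySem.Dict.keys_empty] using hkeys
  -- sorting the keys by first position is the identity: keys are already in that order
  have hkeypw : fp.keys.Pairwise (fun a b => fp.getD a 0 ≤ fp.getD b 0) := by
    have : fp.items.Pairwise (fun p q => fp.getD p.1 0 ≤ fp.getD q.1 0) := by
      refine hpw.imp_of_mem ?_
      intro p q hp hq hlt
      rw [show p = (p.1, p.2) from rfl] at hp
      rw [show q = (q.1, q.2) from rfl] at hq
      rw [PySem.Dict.getD_of_mem_items fp hp hnd 0, PySem.Dict.getD_of_mem_items fp hq hnd 0]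
      omega
    simpa [PySem.Dict.keys, List.pairwise_map] using this
  rw [PySem.List.sorted_eq_self_of_pairwise _ _ hkeypw]
  rw [build_loop_eq_pvD fp.keys (by exact hnd), hkeys']
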